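-- pv_equiv track=rewrite | github.com/douglasdecouto/ac34-ios | crc/crc32.py | create_table_standard
-- ===== SOURCE A (Python) =====
-- def create_table_standard(poly):
--     table = [0]*256;
--     for i in range(256):
--         entry = i
--         for j in range(8):
--             if (entry & 1) == 1:
--                 entry = ((entry >> 1) ^ poly) & 0xFFffFFff
--             else:
--                 entry = (entry >> 1) & 0xFFffFFff
--         table[i] = entry
--     return table
-- ===== SOURCE B (Python) =====
-- def create_table_standard(poly):
--     # Fast CRC table build: compute only the 8 single-bit entries by iterating
--     # the shift-xor step on c, and derive every other entry by XOR linearity.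
--     table = [0] * 256
--     c = 1
--     for k in (128, 64, 32, 16, 8, 4, 2, 1):
--         if (c & 1) == 1:
--             c = ((c >> 1) ^ poly) & 0xFFffFFff
--         else:
--             c = (c >> 1) & 0xFFffFFff
--         for n in range(0, 256, 2 * k):
--             table[n + k] = c ^ table[n]
--     return table
-- ===== Notes on version B (the rewrite author's own statement) =====
-- stated objective: alternative
-- what changed: B iterates the shift-xor step on a single accumulator to obtain just the single-bit CRC values and derives every remaining table entry by one XOR using linearity (table[n+k] = c ^ table[n]), instead of A's per-entry inner loop of shift-xor rounds; this does an eighth of the shift-xor work, though both builds are constant-size and too fast for a timing run.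
import Mathlib
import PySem

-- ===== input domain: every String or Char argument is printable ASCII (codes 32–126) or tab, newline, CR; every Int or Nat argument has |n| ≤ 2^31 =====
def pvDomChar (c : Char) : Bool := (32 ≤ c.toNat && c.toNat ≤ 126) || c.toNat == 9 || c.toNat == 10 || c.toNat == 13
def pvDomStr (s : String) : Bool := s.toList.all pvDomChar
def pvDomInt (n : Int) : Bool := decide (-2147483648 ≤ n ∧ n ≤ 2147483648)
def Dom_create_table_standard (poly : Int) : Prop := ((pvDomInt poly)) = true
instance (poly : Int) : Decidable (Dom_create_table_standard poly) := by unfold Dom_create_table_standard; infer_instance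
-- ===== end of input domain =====

-- B builds the CRC table from the single-bit entries alone, deriving the rest by XOR
-- linearity, instead of A's per-entry shift-xor inner loop; return values proved equal.

-- ===== PORT A =====
-- one round of A's inner loop: ((entry >> 1) ^ poly) & 0xFFffFFff  /  (entry >> 1) & 0xFFffFFff
def pvStepA (poly entry : Int) : Int :=
  if PySem.Int.band entry 1 = 1 then
    PySem.Int.band (PySem.Int.bxor (entry >>> (1 : Nat)) poly) 4294967295
  else
    PySem.Int.band (entry >>> (1 : Nat)) 4294967295

def create_table_standard (poly : Int) : List Int :=
  (List.range 256).foldl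
    (fun table i =>
      table.set i (List.foldl (fun entry _ => pvStepA poly entry) (i : Int) (List.range 8)))
    (List.replicate 256 0)

-- ===== PORT B =====
-- body of B's outer loop: update c, then fill table[n+k] = c ^ table[n] for n in range(0,256,2k)
def pvBodyB (poly : Int) (st : List Int × Int) (k : Int) : List Int × Int :=
  let c : Int :=
    if PySem.Int.band st.2 1 = 1 then
      PySem.Int.band (PySem.Int.bxor (st.2 >>> (1 : Nat)) poly) 4294967295
    else
      PySem.Int.band (st.2 >>> (1 : Nat)) 4294967295
  ((PySem.List.pyRange 0 256 (2 * k)).foldl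
    (fun t n =>
      match PySem.List.pyGet? t n with   -- t[n]; in range on every reached n (guard for totality only)
      | some v => t.set (n + k).toNat (PySem.Int.bxor c v)
      | none => t)
    st.1,
   c)

def create_table_standard_alt (poly : Int) : List Int :=
  (([(128 : Int), 64, 32, 16, 8, 4, 2, 1]).foldl (pvBodyB poly) (List.replicate 256 0, 1)).1

-- ===== PRECONDITION & SPEC =====
def Spec_create_table_standard (poly : Int) (out : List Int) : Prop := out = create_table_standard_alt poly
instance (poly : Int) (out : List Int) : Decidable (Spec_create_table_standard poly out) := by unfold Spec_create_table_standard; infer_instance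

-- ===== CLAIM (what is proved, stated in full; the proofs are below) =====
def Claim_equal_create_table_standard : Prop := ∀ (poly : Int), Dom_create_table_standard poly → Spec_create_table_standard poly (create_table_standard poly)

-- ===== LEMMAS AND PROOFS =====

def pvStepN (q e : Nat) : Nat :=
  if e % 2 = 1 then (e / 2 ^^^ q) &&& 4294967295 else (e / 2) &&& 4294967295

def pvQ (poly : Int) : Nat := (PySem.Int.band poly 4294967295).toNat

def pvG (poly : Int) (i : Nat) : Nat := (pvStepN (pvQ poly))^[8] i

theorem pv_xor_mod_two (a b : Nat) : (a ^^^ b) % 2 = (a % 2 + b % 2) % 2 := by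
  have h := Nat.testBit_xor a b 0
  simp [Nat.testBit_zero] at h
  rcases Nat.mod_two_eq_zero_or_one a with ha | ha <;>
  rcases Nat.mod_two_eq_zero_or_one b with hb | hb <;>
  simp [ha, hb] at h ⊢ <;> omega

theorem pv_xor_eq (a b : Nat) : a ^^^ b = 2 * (a / 2 ^^^ b / 2) + (a % 2 + b % 2) % 2 := by
  have h1 : (a ^^^ b) / 2 = a / 2 ^^^ b / 2 := Nat.xor_div_two
  have h2 := pv_xor_mod_two a b
  omega

theorem pv_disj (m t : Nat) : 2 ^ m ^^^ 2 ^ (m + 1) * t = 2 ^ (m + 1) * t + 2 ^ m := by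
  induction m generalizing t with
  | zero =>
    have h := pv_xor_eq 1 (2 * t)
    simpa [Nat.mul_mod_right] using h
  | succ m ih =>
    have h := pv_xor_eq (2 ^ (m + 1)) (2 ^ (m + 1 + 1) * t)
    have e1 : 2 ^ (m + 1) / 2 = 2 ^ m := by
      rw [pow_succ]; omega
    have e0 : 2 ^ (m + 1 + 1) * t = 2 * (2 ^ (m + 1) * t) := by ring
    have e2 : 2 ^ (m + 1 + 1) * t / 2 = 2 ^ (m + 1) * t := by omega
    have p1 : 2 ^ (m + 1) % 2 = 0 := by rw [pow_succ]; omega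
    have p2 : 2 ^ (m + 1 + 1) * t % 2 = 0 := by omega
    rw [e1, e2, p1, p2, ih] at h
    have hq : 2 ^ (m + 1) = 2 * 2 ^ m := by rw [pow_succ]; omega
    omega

theorem pv_compl_mask (n : Nat) : ∀ s : Nat, s < 2 ^ n → (2 ^ n - 1) ^^^ s = 2 ^ n - 1 - s := by
  induction n with
  | zero => intro s hs; interval_cases s; simp
  | succ n ih =>
    intro s hs
    have h := pv_xor_eq (2 ^ (n + 1) - 1) s
    have e1 : (2 ^ (n + 1) - 1) / 2 = 2 ^ n - 1 := by rw [pow_succ]; omega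
    have p1 : (2 ^ (n + 1) - 1) % 2 = 1 := by
      rw [pow_succ]
      have : 0 < 2 ^ n := Nat.pow_pos (a := 2) (by norm_num)
      omega
    have hlt : s / 2 < 2 ^ n := by rw [pow_succ] at hs; omega
    rw [h, e1, p1, ih _ hlt]
    have : 0 < 2 ^ n := Nat.pow_pos (a := 2) (by norm_num)
    rw [pow_succ]
    omega

theorem pv_neg_case (a nn : Nat) :
    4294967295 - (4294967295 &&& (a ^^^ nn)) = (a ^^^ (4294967295 - (4294967295 &&& nn))) &&& 4294967295 := by
  have key : ∀ t : Nat, (4294967295 : Nat) - (4294967295 &&& t) = 4294967295 ^^^ (4294967295 &&& t) := by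
    intro t
    have hle : (4294967295 : Nat) &&& t ≤ 4294967295 := Nat.and_le_left
    have h2 := pv_compl_mask 32 (4294967295 &&& t) (by omega)
    norm_num at h2
    omega
  rw [key, key]
  apply Nat.eq_of_testBit_eq
  intro i
  have hm : (4294967295 : Nat) = 2 ^ 32 - 1 := by norm_num
  simp only [hm, Nat.testBit_xor, Nat.testBit_and, Nat.testBit_two_pow_sub_one]
  by_cases h : i < 32 <;> simp [h]

theorem pv_band_neg_mask (x : Nat) :
    PySem.Int.band (-(x : Int) - 1) 4294967295 = ((4294967295 - (4294967295 &&& x) : Nat) : Int) := by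
  rw [PySem.Int.band, if_neg (by omega), if_pos (by norm_num)]
  simp

theorem pv_stepA_eq (poly : Int) (e : Nat) :
    pvStepA poly (e : Int) = ((pvStepN (pvQ poly) e : Nat) : Int) := by
  have hshift : ((e : Int) >>> (1 : Nat)) = ((e / 2 : Nat) : Int) := by
    rw [← Int.natCast_shiftRight, Nat.shiftRight_one]
  have hband1 : PySem.Int.band (e : Int) 1 = ((e % 2 : Nat) : Int) := by
    have h1 : ((1 : Int)) = ((1 : Nat) : Int) := rfl
    rw [h1, PySem.Int.band_natCast, Nat.and_one_is_mod]
  have hm : ((4294967295 : Int)) = ((4294967295 : Nat) : Int) := rfl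
  by_cases hpar : e % 2 = 1
  · -- odd branch
    rw [pvStepA, if_pos (by rw [hband1, hpar]; rfl), pvStepN, if_pos hpar, hshift]
    by_cases hp : 0 ≤ poly
    · -- poly ≥ 0
      have hq : pvQ poly = poly.toNat &&& 4294967295 := by
        rw [pvQ, PySem.Int.band_of_nonneg hp (by norm_num)]
        simp
      rw [PySem.Int.bxor_of_nonneg (by positivity) hp, Int.toNat_natCast, hm,
        PySem.Int.band_natCast, hq]
      congr 1
      apply Nat.eq_of_testBit_eq
      intro i
      simp only [Nat.testBit_xor, Nat.testBit_and]
      cases (e / 2).testBit i <;> cases poly.toNat.testBit i <;>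
        cases Nat.testBit 4294967295 i <;> rfl
    · -- poly < 0
      have hneg : poly < 0 := by omega
      have hbx : PySem.Int.bxor ((e / 2 : Nat) : Int) poly
          = -(((e / 2 ^^^ (-poly - 1).toNat : Nat) : Int)) - 1 := by
        rw [PySem.Int.bxor, if_pos (by positivity), if_neg (by omega), Int.toNat_natCast]
      have hq : pvQ poly = 4294967295 - (4294967295 &&& (-poly - 1).toNat) := by
        rw [pvQ, PySem.Int.band, if_neg (by omega), if_pos (by norm_num)]
        simp
      rw [hbx, pv_band_neg_mask, hq]
      exact congrArg _ (pv_neg_case (e / 2) (-poly - 1).toNat)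
  · -- even branch
    rw [pvStepA, if_neg (by rw [hband1]; omega), pvStepN, if_neg hpar, hshift, hm,
      PySem.Int.band_natCast]

theorem pv_stepN_xor (q a b : Nat) : pvStepN q (a ^^^ b) = pvStepN q a ^^^ pvStepN q b := by
  have hdiv : (a ^^^ b) / 2 = a / 2 ^^^ b / 2 := Nat.xor_div_two
  have hmod := pv_xor_mod_two a b
  have hd : ∀ x y c : Nat, (x ^^^ y) &&& c = (x &&& c) ^^^ (y &&& c) := fun _ _ _ => Nat.and_xor_distrib_right
  rcases Nat.mod_two_eq_zero_or_one a with ha | ha <;>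
    rcases Nat.mod_two_eq_zero_or_one b with hb | hb
  · rw [pvStepN, if_neg (by omega), pvStepN, if_neg (by omega), pvStepN, if_neg (by omega),
      hdiv, hd]
  · rw [pvStepN, if_pos (by omega), pvStepN, if_neg (by omega), pvStepN, if_pos hb,
      hdiv, ← hd]
    congr 1
    simp [Nat.xor_comm, Nat.xor_left_comm]
  · rw [pvStepN, if_pos (by omega), pvStepN, if_pos ha, pvStepN, if_neg (by omega),
      hdiv, ← hd]
    congr 1
    simp [Nat.xor_comm, Nat.xor_left_comm]
  · rw [pvStepN, if_neg (by omega), pvStepN, if_pos ha, pvStepN, if_pos hb,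
      hdiv, ← hd]
    congr 1
    simp [Nat.xor_comm, Nat.xor_left_comm]

theorem pv_iter_xor (q : Nat) (n : Nat) (a b : Nat) :
    (pvStepN q)^[n] (a ^^^ b) = (pvStepN q)^[n] a ^^^ (pvStepN q)^[n] b := by
  induction n generalizing a b with
  | zero => simp
  | succ n ih => simp only [Function.iterate_succ_apply, pv_stepN_xor, ih]

theorem pv_g_xor (poly : Int) (a b : Nat) : pvG poly (a ^^^ b) = pvG poly a ^^^ pvG poly b :=
  pv_iter_xor _ 8 a b

theorem pv_stepN_zero (q : Nat) : pvStepN q 0 = 0 := by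
  rw [pvStepN, if_neg (by omega)]
  rfl

theorem pv_g_zero (poly : Int) : pvG poly 0 = 0 := by
  have : ∀ n, (pvStepN (pvQ poly))^[n] 0 = 0 := by
    intro n
    induction n with
    | zero => rfl
    | succ n ih => rw [Function.iterate_succ_apply, pv_stepN_zero, ih]
  exact this 8

-- set on a range-map is a pointwise update

theorem pv_set_map_range (n : Nat) (f : Nat → Int) (i0 : Nat) (v : Int) (h : i0 < n) :
    ((List.range n).map f).set i0 v = (List.range n).map (fun i => if i = i0 then v else f i) := by
  apply List.ext_getElem
  · simp
  · intro i h1 h2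
    simp only [List.length_set, List.length_map, List.length_range] at h1
    simp [List.getElem_set, List.getElem_map, List.getElem_range]
    by_cases hi : i0 = i
    · simp [hi]
    · simp [hi, Ne.symm hi]

-- a foldl that ignores list elements is function iteration

theorem pv_foldA (poly : Int) : ∀ (l : List Nat) (e : Nat),
    List.foldl (fun entry _ => pvStepA poly entry) ((e : Nat) : Int) l
      = (((pvStepN (pvQ poly))^[l.length] e : Nat) : Int) := by
  intro l
  induction l with
  | nil => intro e; rfl
  | cons a l ih =>
    intro e
    rw [List.foldl_cons, pv_stepA_eq, ih, List.length_cons, ← Function.iterate_succ_apply]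

-- filling a list front-to-back by set

theorem pv_foldl_set_range (h : Nat → Int) : ∀ (n : Nat) (t : List Int), n ≤ t.length →
    (List.range n).foldl (fun tb i => tb.set i (h i)) t = (List.range n).map h ++ t.drop n := by
  intro n
  induction n with
  | zero => intro t _; simp
  | succ n ih =>
    intro t hn
    rw [List.range_succ, List.foldl_append, ih t (by omega), List.foldl_cons, List.foldl_nil,
      List.set_append_right _ _ (by simp)]
    have hlen : ((List.range n).map h).length = n := by simp
    have hd : t.drop n = t[n] :: t.drop (n + 1) := List.drop_eq_getElem_cons (by omega)
    rw [hlen, Nat.sub_self, hd, List.set_cons_zero, List.map_append]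
    simp

def pvFull (poly : Int) (s : Nat) : List Int :=
  (List.range 256).map (fun i => if i % s = 0 then ((pvG poly i : Nat) : Int) else 0)

theorem pv_A_eq (poly : Int) :
    create_table_standard poly = (List.range 256).map (fun i => ((pvG poly i : Nat) : Int)) := by
  rw [create_table_standard]
  have hbody : (fun (table : List Int) (i : Nat) =>
      table.set i (List.foldl (fun entry _ => pvStepA poly entry) (i : Int) (List.range 8)))
      = fun table i => table.set i ((pvG poly i : Nat) : Int) := by
    funext table i
    rw [pv_foldA poly (List.range 8) i]
    simp only [List.length_range, pvG]
  rw [hbody, pv_foldl_set_range _ 256 _ (by rw [List.length_replicate]), List.drop_replicate]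
  norm_num

-- pyRange with a positive stride dividing the length

theorem pv_pyRange (s h : Nat) (hs : 0 < s) (hsh : s * h = 256) :
    PySem.List.pyRange 0 256 ((s : Nat) : Int) = (List.range h).map (fun j => ((s * j : Nat) : Int)) := by
  rw [PySem.List.pyRange_of_pos _ _ (by exact_mod_cast hs)]
  have hcount : (((256 : Int) - 0 + (s : Int) - 1) / (s : Int)).toNat = h := by
    have h1 : ((256 : Int) - 0 + (s : Int) - 1) = ((255 + s : Nat) : Int) := by push_cast; ring
    rw [h1, ← Int.natCast_div, Int.toNat_natCast]
    have h2 : h * s = s * h := Nat.mul_comm _ _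
    have h3 : (h + 1) * s = h * s + s := Nat.succ_mul _ _
    exact Nat.div_eq_of_lt_le (by omega) (by omega)
  rw [if_pos (by norm_num), hcount]
  apply List.map_congr_left
  intro j _
  push_cast
  ring

-- the single-bit entries are the iterates of the step on 1

theorem pv_red (poly : Int) : ∀ m : Nat, m ≤ 7 → (pvStepN (pvQ poly))^[m] (2 ^ m) = 1 := by
  intro m
  induction m with
  | zero => intro _; rfl
  | succ m ih =>
    intro hm
    rw [Function.iterate_succ_apply]
    have hstep : pvStepN (pvQ poly) (2 ^ (m + 1)) = 2 ^ m := by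
      rw [pvStepN, if_neg (by rw [pow_succ]; omega)]
      have h1 : 2 ^ (m + 1) / 2 = 2 ^ m := by rw [pow_succ]; omega
      have h2 : (4294967295 : Nat) = 2 ^ 32 - 1 := by norm_num
      rw [h1, h2, Nat.and_two_pow_sub_one_eq_mod]
      exact Nat.mod_eq_of_lt (Nat.pow_lt_pow_right (by norm_num) (by omega))
    rw [hstep, ih (by omega)]

theorem pv_gpow (poly : Int) (m : Nat) (hm : m ≤ 7) :
    pvG poly (2 ^ m) = (pvStepN (pvQ poly))^[8 - m] 1 := by
  have h1 := pv_red poly m hm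
  rw [pvG, ← h1, ← Function.iterate_add_apply]
  congr 1
  omega

def pvTab (poly : Int) (m J : Nat) : List Int :=
  (List.range 256).map (fun i =>
    if i % 2 ^ (m + 1) = 0 ∨ (i % 2 ^ (m + 1) = 2 ^ m ∧ i < J * 2 ^ (m + 1))
    then ((pvG poly i : Nat) : Int) else 0)

theorem pv_inner (poly : Int) (m : Nat) (hm : m ≤ 7) :
    ∀ J, J ≤ 2 ^ (7 - m) →
      (List.range J).foldl
        (fun t j =>
          match PySem.List.pyGet? t ((2 ^ (m + 1) * j : Nat) : Int) with
          | some v => t.set (((2 ^ (m + 1) * j : Nat) : Int) + ((2 ^ m : Nat) : Int)).toNat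
                        (PySem.Int.bxor ((pvG poly (2 ^ m) : Nat) : Int) v)
          | none => t)
        (pvTab poly m 0)
      = pvTab poly m J := by
  intro J
  induction J with
  | zero => intro _; rfl
  | succ J ih =>
    intro hJ
    have hP : (0:Nat) < 2 ^ m := Nat.pow_pos (by norm_num)
    have hQ : (2:Nat) ^ (m + 1) = 2 * 2 ^ m := by rw [pow_succ]; ring
    have htot : (2:Nat) ^ (7 - m) * 2 ^ (m + 1) = 256 := by
      rw [← pow_add, show 7 - m + (m + 1) = 8 by omega]; norm_num
    have hJm : (J + 1) * 2 ^ (m + 1) ≤ 256 := by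
      calc (J + 1) * 2 ^ (m + 1) ≤ 2 ^ (7 - m) * 2 ^ (m + 1) :=
            Nat.mul_le_mul_right _ hJ
        _ = 256 := htot
    have hJ1 : (J + 1) * 2 ^ (m + 1) = J * 2 ^ (m + 1) + 2 ^ (m + 1) := Nat.succ_mul _ _
    have hn256 : 2 ^ (m + 1) * J < 256 := by
      have := Nat.mul_comm (2 ^ (m + 1)) J
      omega
    have hi0 : 2 ^ (m + 1) * J + 2 ^ m < 256 := by
      have := Nat.mul_comm (2 ^ (m + 1)) J
      omega
    rw [List.range_succ, List.foldl_append, ih (by omega), List.foldl_cons, List.foldl_nil]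
    -- evaluate the read
    have hread : PySem.List.pyGet? (pvTab poly m J) ((2 ^ (m + 1) * J : Nat) : Int)
        = some ((pvG poly (2 ^ (m + 1) * J) : Nat) : Int) := by
      rw [PySem.List.pyGet?_natCast, pvTab, List.getElem?_map, List.getElem?_range hn256]
      simp [Nat.mul_mod_right]
    rw [hread]
    dsimp only
    -- evaluate the write
    have hidx : ((((2 ^ (m + 1) * J : Nat) : Int)) + ((2 ^ m : Nat) : Int)).toNat
        = 2 ^ (m + 1) * J + 2 ^ m := by
      rw [← Nat.cast_add, Int.toNat_natCast]
    have hval : PySem.Int.bxor ((pvG poly (2 ^ m) : Nat) : Int) ((pvG poly (2 ^ (m + 1) * J) : Nat) : Int)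
        = ((pvG poly (2 ^ (m + 1) * J + 2 ^ m) : Nat) : Int) := by
      rw [PySem.Int.bxor_natCast, ← pv_g_xor, pv_disj]
    rw [hidx, hval, pvTab, pv_set_map_range _ _ _ _ hi0]
    apply List.map_congr_left
    intro i hi
    rw [List.mem_range] at hi
    by_cases hii : i = 2 ^ (m + 1) * J + 2 ^ m
    · rw [if_pos hii, hii]
      have hc1 : (2 ^ (m + 1) * J + 2 ^ m) % 2 ^ (m + 1) = 2 ^ m := by
        rw [Nat.mul_add_mod]
        exact Nat.mod_eq_of_lt (by omega)
      rw [if_pos (Or.inr ⟨hc1, by have := Nat.mul_comm (2 ^ (m + 1)) J; omega⟩)]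
    · rw [if_neg hii]
      by_cases hcond : i % 2 ^ (m + 1) = 0 ∨ (i % 2 ^ (m + 1) = 2 ^ m ∧ i < J * 2 ^ (m + 1))
      · rw [if_pos hcond, if_pos]
        rcases hcond with h | ⟨h1, h2⟩
        · exact Or.inl h
        · exact Or.inr ⟨h1, by omega⟩
      · rw [if_neg hcond, if_neg]
        intro hc
        apply hcond
        rcases hc with h | ⟨h1, h2⟩
        · exact Or.inl h
        · refine Or.inr ⟨h1, ?_⟩
          by_contra hge
          push_neg at hge
          -- i is the freshly written index, contradiction with hii
          have hdiv : i / 2 ^ (m + 1) = J :=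
            Nat.div_eq_of_lt_le (by omega) (by omega)
          have hdm := Nat.div_add_mod i (2 ^ (m + 1))
          rw [hdiv, h1] at hdm
          exact hii (by omega)

theorem pv_tab_zero (poly : Int) (m : Nat) : pvTab poly m 0 = pvFull poly (2 ^ (m + 1)) := by
  apply List.map_congr_left
  intro i _
  simp

theorem pv_tab_last (poly : Int) (m : Nat) (hm : m ≤ 7) :
    pvTab poly m (2 ^ (7 - m)) = pvFull poly (2 ^ m) := by
  apply List.map_congr_left
  intro i hi
  rw [List.mem_range] at hi
  have hP : (0:Nat) < 2 ^ m := Nat.pow_pos (by norm_num)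
  have hQ : (2:Nat) ^ (m + 1) = 2 * 2 ^ m := by rw [pow_succ]; ring
  have htot : (2:Nat) ^ (7 - m) * 2 ^ (m + 1) = 256 := by
    rw [← pow_add, show 7 - m + (m + 1) = 8 by omega]; norm_num
  have hiJ : i < 2 ^ (7 - m) * 2 ^ (m + 1) := by omega
  have hmm : i % 2 ^ (m + 1) % 2 ^ m = i % 2 ^ m := Nat.mod_mod_of_dvd i ⟨2, by omega⟩
  have hr : i % 2 ^ (m + 1) < 2 ^ (m + 1) := Nat.mod_lt _ (by omega)
  congr 1
  rw [eq_iff_iff]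
  constructor
  · rintro (h | ⟨h1, _⟩)
    · rw [← hmm, h, Nat.zero_mod]
    · rw [← hmm, h1, Nat.mod_self]
  · intro h
    rw [← hmm] at h
    obtain ⟨u, hu⟩ := (Nat.dvd_iff_mod_eq_zero).mpr h
    have hu2 : u < 2 := by
      by_contra hge
      push_neg at hge
      have : 2 * 2 ^ m ≤ 2 ^ m * u := by
        calc 2 * 2 ^ m = 2 ^ m * 2 := by ring
          _ ≤ 2 ^ m * u := Nat.mul_le_mul_left _ hge
      omega
    interval_cases u
    · left; omega
    · right
      constructor
      · omega
      · omega

theorem pv_init (poly : Int) : List.replicate 256 (0 : Int) = pvFull poly 256 := by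
  unfold pvFull
  apply List.ext_getElem
  · rw [List.length_replicate, List.length_map, List.length_range]
  · intro i h1 h2
    rw [List.length_replicate] at h1
    rw [List.getElem_replicate, List.getElem_map, List.getElem_range]
    by_cases hi : i = 0
    · simp [hi, pv_g_zero]
    · rw [if_neg (by rw [Nat.mod_eq_of_lt h1]; exact hi)]

theorem pv_full_one (poly : Int) :
    pvFull poly (2 ^ 0) = (List.range 256).map (fun i => ((pvG poly i : Nat) : Int)) := by
  apply List.map_congr_left
  intro i _
  simp [Nat.mod_one]

theorem pv_outer (poly : Int) (m : Nat) (hm : m ≤ 7) (tb : List Int) (c k : Int)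
    (htb : tb = pvFull poly (2 ^ (m + 1))) (hk : k = ((2 ^ m : Nat) : Int))
    (hc : c = (((pvStepN (pvQ poly))^[7 - m] 1 : Nat) : Int)) :
    pvBodyB poly (tb, c) k
      = (pvFull poly (2 ^ m), (((pvStepN (pvQ poly))^[8 - m] 1 : Nat) : Int)) := by
  rw [pvBodyB, htb, hk, hc]
  have hcval : (if PySem.Int.band (((((pvStepN (pvQ poly))^[7 - m] 1 : Nat)) : Int)) 1 = 1 then
      PySem.Int.band (PySem.Int.bxor ((((pvStepN (pvQ poly))^[7 - m] 1 : Nat) : Int) >>> (1 : Nat)) poly) 4294967295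
    else
      PySem.Int.band ((((pvStepN (pvQ poly))^[7 - m] 1 : Nat) : Int) >>> (1 : Nat)) 4294967295)
      = (((pvStepN (pvQ poly))^[8 - m] 1 : Nat) : Int) := by
    rw [show (if PySem.Int.band (((((pvStepN (pvQ poly))^[7 - m] 1 : Nat)) : Int)) 1 = 1 then
      PySem.Int.band (PySem.Int.bxor ((((pvStepN (pvQ poly))^[7 - m] 1 : Nat) : Int) >>> (1 : Nat)) poly) 4294967295
    else
      PySem.Int.band ((((pvStepN (pvQ poly))^[7 - m] 1 : Nat) : Int) >>> (1 : Nat)) 4294967295)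
      = pvStepA poly (((pvStepN (pvQ poly))^[7 - m] 1 : Nat) : Int) from rfl]
    rw [pv_stepA_eq]
    congr 1
    rw [← Function.iterate_succ_apply' (pvStepN (pvQ poly)) (7 - m) 1]
    congr 1
    omega
  dsimp only
  rw [hcval]
  have h2k : 2 * ((2 ^ m : Nat) : Int) = ((2 ^ (m + 1) : Nat) : Int) := by
    push_cast [pow_succ]
    ring
  have htot : (2:Nat) ^ (m + 1) * 2 ^ (7 - m) = 256 := by
    rw [← pow_add, show m + 1 + (7 - m) = 8 by omega]; norm_num
  rw [h2k, pv_pyRange (2 ^ (m + 1)) (2 ^ (7 - m)) (Nat.pow_pos (by norm_num)) htot,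
    List.foldl_map]
  have hg : (((pvStepN (pvQ poly))^[8 - m] 1 : Nat) : Int) = ((pvG poly (2 ^ m) : Nat) : Int) := by
    rw [pv_gpow poly m hm]
  rw [hg, ← pv_tab_zero, pv_inner poly m hm (2 ^ (7 - m)) (le_refl _), pv_tab_last poly m hm]

theorem pv_main (poly : Int) : create_table_standard poly = create_table_standard_alt poly := by
  rw [create_table_standard_alt]
  simp only [List.foldl_cons, List.foldl_nil]
  rw [pv_outer poly 7 (by norm_num) (List.replicate 256 0) 1 128
    (by rw [pv_init poly]; norm_num) (by norm_num) (by simp)]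
  rw [pv_outer poly 6 (by norm_num) (pvFull poly (2 ^ 7))
    (((pvStepN (pvQ poly))^[8 - 7] 1 : Nat) : Int) 64 (by norm_num) (by norm_num) (by norm_num)]
  rw [pv_outer poly 5 (by norm_num) (pvFull poly (2 ^ 6))
    (((pvStepN (pvQ poly))^[8 - 6] 1 : Nat) : Int) 32 (by norm_num) (by norm_num) (by norm_num)]
  rw [pv_outer poly 4 (by norm_num) (pvFull poly (2 ^ 5))
    (((pvStepN (pvQ poly))^[8 - 5] 1 : Nat) : Int) 16 (by norm_num) (by norm_num) (by norm_num)]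
  rw [pv_outer poly 3 (by norm_num) (pvFull poly (2 ^ 4))
    (((pvStepN (pvQ poly))^[8 - 4] 1 : Nat) : Int) 8 (by norm_num) (by norm_num) (by norm_num)]
  rw [pv_outer poly 2 (by norm_num) (pvFull poly (2 ^ 3))
    (((pvStepN (pvQ poly))^[8 - 3] 1 : Nat) : Int) 4 (by norm_num) (by norm_num) (by norm_num)]
  rw [pv_outer poly 1 (by norm_num) (pvFull poly (2 ^ 2))
    (((pvStepN (pvQ poly))^[8 - 2] 1 : Nat) : Int) 2 (by norm_num) (by norm_num) (by norm_num)]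
  rw [pv_outer poly 0 (by norm_num) (pvFull poly (2 ^ 1))
    (((pvStepN (pvQ poly))^[8 - 1] 1 : Nat) : Int) 1 (by norm_num) (by norm_num) (by norm_num)]
  rw [pv_A_eq, ← pv_full_one]

-- ===== VERDICT (by name: the statement is the Claim_ definition above) =====
theorem create_table_standard_spec : Claim_equal_create_table_standard := by
  intro poly _
  exact pv_main poly
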